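-- pv_equiv track=rewrite | github.com/imbator/LiTracker | source/games_analisys.py | check_game_similarity
-- ===== SOURCE A (Python) =====
-- def check_game_similarity(base_moves_str, recent_game_moves_str, similarity_threshold=5):
--     base_moves = base_moves_str.split()
--     recent_game_moves = recent_game_moves_str.split()
--
--     # Подсчет количества совпадающих ходов с начала списка
--     similar_moves_count = 0
--     for base_move, recent_game_move in zip(base_moves, recent_game_moves):
--         if base_move == recent_game_move:
--             similar_moves_count += 1
--         else:
--             break  # Прерываем цикл при первом несовпадении
--
--     # Проверяем, достигнут ли порог похожести
--     return similar_moves_count >= similarity_threshold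
-- ===== SOURCE B (Python) =====
-- def check_game_similarity(base_moves_str, recent_game_moves_str, similarity_threshold=5):
--     if similarity_threshold <= 0:
--         return True
--     base_moves = base_moves_str.split()
--     recent_game_moves = recent_game_moves_str.split()
--     return (len(base_moves) >= similarity_threshold
--             and base_moves[:similarity_threshold] == recent_game_moves[:similarity_threshold])
-- ===== Notes on version B (the rewrite author's own statement) =====
-- stated objective: simpler
-- what changed: The counting loop with early break is replaced by a direct prefix-slice comparison: a non-positive threshold is trivially met, otherwise the first threshold moves of both lists must exist and be equal.
import Mathlib
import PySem

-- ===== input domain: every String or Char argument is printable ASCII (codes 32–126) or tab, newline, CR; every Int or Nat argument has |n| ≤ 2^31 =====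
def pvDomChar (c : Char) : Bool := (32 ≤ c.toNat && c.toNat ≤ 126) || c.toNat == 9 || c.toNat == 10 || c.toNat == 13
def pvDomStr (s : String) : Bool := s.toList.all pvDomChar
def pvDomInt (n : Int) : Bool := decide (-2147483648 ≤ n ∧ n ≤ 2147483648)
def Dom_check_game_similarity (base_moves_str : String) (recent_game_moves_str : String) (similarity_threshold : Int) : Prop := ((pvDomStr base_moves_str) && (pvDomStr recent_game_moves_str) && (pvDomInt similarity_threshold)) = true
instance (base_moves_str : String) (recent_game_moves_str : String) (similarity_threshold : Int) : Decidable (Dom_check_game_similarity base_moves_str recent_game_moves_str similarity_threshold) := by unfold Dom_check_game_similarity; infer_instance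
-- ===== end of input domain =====

-- B replaces A's counting loop with an early break by a direct prefix comparison of the first
-- `similarity_threshold` moves (simpler; same cost).


-- ===== PORT A =====
-- the for-loop over zip(base_moves, recent_game_moves) with its running counter and break
def csLoop : List (String × String) → Int → Int
  | [], acc => acc
  | (a, b) :: rest, acc => if a = b then csLoop rest (acc + 1) else acc

def check_game_similarity (base_moves_str : String) (recent_game_moves_str : String) (similarity_threshold : Int) : Bool :=
  let base_moves := PySem.Str.split₀ base_moves_str
  let recent_game_moves := PySem.Str.split₀ recent_game_moves_str
  let similar_moves_count := csLoop (base_moves.zip recent_game_moves) 0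
  decide (similarity_threshold ≤ similar_moves_count)

-- ===== PORT B =====
def check_game_similarity_alt (base_moves_str : String) (recent_game_moves_str : String) (similarity_threshold : Int) : Bool :=
  if similarity_threshold ≤ 0 then true
  else
    let base_moves := PySem.Str.split₀ base_moves_str
    let recent_game_moves := PySem.Str.split₀ recent_game_moves_str
    -- xs[:t] with 0 < t is List.take t (exact: Python's slice with a positive stop clamps like take)
    decide (similarity_threshold ≤ base_moves.length ∧
      base_moves.take similarity_threshold.toNat = recent_game_moves.take similarity_threshold.toNat)

-- ===== PRECONDITION & SPEC =====
def Spec_check_game_similarity (base_moves_str : String) (recent_game_moves_str : String) (similarity_threshold : Int) (out : Bool) : Prop := out = check_game_similarity_alt base_moves_str recent_game_moves_str similarity_threshold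
instance (base_moves_str : String) (recent_game_moves_str : String) (similarity_threshold : Int) (out : Bool) : Decidable (Spec_check_game_similarity base_moves_str recent_game_moves_str similarity_threshold out) := by unfold Spec_check_game_similarity; infer_instance

-- ===== CLAIM (what is proved, stated in full; the proofs are below) =====
def Claim_equal_check_game_similarity : Prop := ∀ (base_moves_str : String) (recent_game_moves_str : String) (similarity_threshold : Int), Dom_check_game_similarity base_moves_str recent_game_moves_str similarity_threshold → Spec_check_game_similarity base_moves_str recent_game_moves_str similarity_threshold (check_game_similarity base_moves_str recent_game_moves_str similarity_threshold)

-- ===== LEMMAS AND PROOFS =====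

-- length of the common prefix of two lists
def prefLen : List String → List String → Nat
  | [], _ => 0
  | _ :: _, [] => 0
  | a :: as, b :: bs => if a = b then prefLen as bs + 1 else 0

theorem csLoop_zip_eq (xs ys : List String) (acc : Int) :
    csLoop (xs.zip ys) acc = acc + (prefLen xs ys : Int) := by
  induction xs generalizing ys acc with
  | nil => simp [csLoop, prefLen]
  | cons a as ih =>
    cases ys with
    | nil => simp [csLoop, prefLen]
    | cons b bs =>
      by_cases h : a = b <;> (simp [csLoop, prefLen, h, ih]; try omega)

theorem prefLen_le_iff (n : Nat) (xs ys : List String) :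
    n ≤ prefLen xs ys ↔ (n ≤ xs.length ∧ xs.take n = ys.take n) := by
  induction xs generalizing ys n with
  | nil =>
    simp [prefLen]
    omega
  | cons a as ih =>
    cases ys with
    | nil =>
      cases n with
      | zero => simp [prefLen]
      | succ m => simp [prefLen]
    | cons b bs =>
      cases n with
      | zero => simp
      | succ m =>
        by_cases h : a = b
        · simp [prefLen, h, ih]
        · simp [prefLen, h]

theorem check_game_similarity_eq_alt (s1 s2 : String) (t : Int) :
    check_game_similarity s1 s2 t = check_game_similarity_alt s1 s2 t := by
  unfold check_game_similarity check_game_similarity_alt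
  simp only [csLoop_zip_eq]
  by_cases h : t ≤ 0
  · simp [h]
    omega
  · simp only [if_neg h, zero_add, decide_eq_decide]
    have hl := prefLen_le_iff t.toNat (PySem.Str.split₀ s1) (PySem.Str.split₀ s2)
    constructor
    · intro hle
      have : t.toNat ≤ prefLen (PySem.Str.split₀ s1) (PySem.Str.split₀ s2) := by omega
      have := hl.mp this
      exact ⟨by omega, this.2⟩
    · intro ⟨h1, h2⟩
      have : t.toNat ≤ prefLen (PySem.Str.split₀ s1) (PySem.Str.split₀ s2) :=
        hl.mpr ⟨by omega, h2⟩
      omega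

-- ===== VERDICT (by name: the statement is the Claim_ definition above) =====
theorem check_game_similarity_spec : Claim_equal_check_game_similarity := by
  intro s1 s2 t _
  unfold Spec_check_game_similarity
  exact check_game_similarity_eq_alt s1 s2 t
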